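-- pv_equiv track=rewrite | github.com/chrisamezqui/musicgenerator | utils.py | get_major_scale
-- ===== SOURCE A (Python) =====
-- def get_major_scale(root, low, high):
--     notes = []
--     degrees = set([0, 2, 4, 5, 7, 9, 11])
--     for note in range(low, high + 1):
--         diff = note - root
--         if diff % 12 in degrees:
--             notes.append(note)
--
--     return notes
-- ===== SOURCE B (Python) =====
-- def get_major_scale(root, low, high):
--     degrees = [0, 2, 4, 5, 7, 9, 11]
--     notes = []
--     for k in range((low - root) // 12, (high - root) // 12 + 1):
--         base = root + 12 * k
--         for d in degrees:
--             note = base + d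
--             if low <= note <= high:
--                 notes.append(note)
--     return notes
-- ===== Notes on version B (the rewrite author's own statement) =====
-- stated objective: alternative
-- what changed: Instead of scanning every integer in [low, high] and testing (note-root) % 12 against a set of degrees, B iterates over the octaves floor((low-root)/12) .. floor((high-root)/12) and the seven sorted scale degrees, emitting root + 12*k + d when it lies in [low, high].
import Mathlib
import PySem

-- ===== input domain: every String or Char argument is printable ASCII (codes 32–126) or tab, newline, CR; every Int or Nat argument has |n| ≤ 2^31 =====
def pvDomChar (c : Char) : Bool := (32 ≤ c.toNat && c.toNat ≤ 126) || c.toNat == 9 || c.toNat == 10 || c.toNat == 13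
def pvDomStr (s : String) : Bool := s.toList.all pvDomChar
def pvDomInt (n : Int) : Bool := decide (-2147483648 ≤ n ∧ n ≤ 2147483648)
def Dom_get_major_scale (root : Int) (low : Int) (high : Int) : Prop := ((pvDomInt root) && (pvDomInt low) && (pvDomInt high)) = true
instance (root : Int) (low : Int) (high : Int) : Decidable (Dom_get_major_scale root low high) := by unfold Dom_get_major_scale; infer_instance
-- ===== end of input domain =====

-- B enumerates the scale octave by octave over the seven degrees instead of testing
-- every integer in [low, high] with a mod-12 membership check (objective: alternative).

-- ===== PORT A =====
def get_major_scale (root : Int) (low : Int) (high : Int) : List Int :=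
  let notes : List Int := []
  let degrees : PySem.Set Int := PySem.Set.ofList [0, 2, 4, 5, 7, 9, 11]
  (PySem.List.pyRange low (high + 1) 1).foldl
    (fun notes note =>
      let diff := note - root
      if PySem.Set.contains degrees (PySem.Int.mod diff 12) then notes ++ [note] else notes)
    notes

-- ===== PORT B =====
def get_major_scale_alt (root : Int) (low : Int) (high : Int) : List Int :=
  let degrees : List Int := [0, 2, 4, 5, 7, 9, 11]
  let notes : List Int := []
  (PySem.List.pyRange (PySem.Int.floordiv (low - root) 12)
      (PySem.Int.floordiv (high - root) 12 + 1) 1).foldl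
    (fun notes k =>
      let base := root + 12 * k
      degrees.foldl
        (fun notes d =>
          let note := base + d
          if low ≤ note ∧ note ≤ high then notes ++ [note] else notes)
        notes)
    notes

-- ===== PRECONDITION & SPEC =====
def Spec_get_major_scale (root : Int) (low : Int) (high : Int) (out : List Int) : Prop := out = get_major_scale_alt root low high
instance (root : Int) (low : Int) (high : Int) (out : List Int) : Decidable (Spec_get_major_scale root low high out) := by unfold Spec_get_major_scale; infer_instance

-- ===== CLAIM (what is proved, stated in full; the proofs are below) =====
def Claim_equal_get_major_scale : Prop := ∀ (root : Int) (low : Int) (high : Int), Dom_get_major_scale root low high → Spec_get_major_scale root low high (get_major_scale root low high)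

-- ===== LEMMAS AND PROOFS =====

-- A as a filter of the integer range
theorem get_major_scale_eq_filter (root low high : Int) :
    get_major_scale root low high =
      (PySem.List.pyRange low (high + 1) 1).filter
        (fun note => PySem.Set.contains (PySem.Set.ofList [0, 2, 4, 5, 7, 9, 11])
          (PySem.Int.mod (note - root) 12)) := by
  unfold get_major_scale
  rw [PySem.List.foldl_append_if_eq_filter]
  simp

-- B's inner loop collects the in-range degrees of one octave
def pvBlock (root low high k : Int) : List Int :=
  (([0, 2, 4, 5, 7, 9, 11] : List Int).filter
      (fun d => decide (low ≤ root + 12 * k + d ∧ root + 12 * k + d ≤ high))).map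
    (fun d => root + 12 * k + d)

theorem get_major_scale_alt_eq_flatMap (root low high : Int) :
    get_major_scale_alt root low high =
      (PySem.List.pyRange (PySem.Int.floordiv (low - root) 12)
          (PySem.Int.floordiv (high - root) 12 + 1) 1).flatMap (pvBlock root low high) := by
  unfold get_major_scale_alt
  have hinner : ∀ (acc : List Int) (k : Int),
      (([0, 2, 4, 5, 7, 9, 11] : List Int).foldl
        (fun notes d =>
          if low ≤ root + 12 * k + d ∧ root + 12 * k + d ≤ high then notes ++ [root + 12 * k + d]
          else notes) acc) = acc ++ pvBlock root low high k := by
    intro acc k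
    have := PySem.List.foldl_append_if
      (l := ([0, 2, 4, 5, 7, 9, 11] : List Int))
      (p := fun d => decide (low ≤ root + 12 * k + d ∧ root + 12 * k + d ≤ high))
      (f := fun d => root + 12 * k + d) (acc := acc)
    simpa [pvBlock] using this
  simp only [hinner]
  rw [PySem.List.foldl_append_eq_flatMap]
  simp

theorem mem_get_major_scale (root low high n : Int) :
    n ∈ get_major_scale root low high ↔
      low ≤ n ∧ n ≤ high ∧
        ((n - root) % 12 = 0 ∨ (n - root) % 12 = 2 ∨ (n - root) % 12 = 4 ∨
          (n - root) % 12 = 5 ∨ (n - root) % 12 = 7 ∨ (n - root) % 12 = 9 ∨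
          (n - root) % 12 = 11) := by
  rw [get_major_scale_eq_filter]
  simp [List.mem_filter, PySem.List.mem_pyRange_one, PySem.Set.contains]
  omega

theorem mem_pvBlock (root low high k n : Int) :
    n ∈ pvBlock root low high k ↔
      ∃ d : Int, (d = 0 ∨ d = 2 ∨ d = 4 ∨ d = 5 ∨ d = 7 ∨ d = 9 ∨ d = 11) ∧
        low ≤ root + 12 * k + d ∧ root + 12 * k + d ≤ high ∧ n = root + 12 * k + d := by
  unfold pvBlock
  simp only [List.mem_map, List.mem_filter, decide_eq_true_eq]
  constructor
  · rintro ⟨d, ⟨hd, h1, h2⟩, rfl⟩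
    refine ⟨d, ?_, h1, h2, rfl⟩
    simpa using hd
  · rintro ⟨d, hd, h1, h2, rfl⟩
    exact ⟨d, ⟨by simpa using hd, h1, h2⟩, rfl⟩

theorem mem_get_major_scale_alt (root low high n : Int) :
    n ∈ get_major_scale_alt root low high ↔
      low ≤ n ∧ n ≤ high ∧
        ((n - root) % 12 = 0 ∨ (n - root) % 12 = 2 ∨ (n - root) % 12 = 4 ∨
          (n - root) % 12 = 5 ∨ (n - root) % 12 = 7 ∨ (n - root) % 12 = 9 ∨
          (n - root) % 12 = 11) := by
  rw [get_major_scale_alt_eq_flatMap]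
  simp only [List.mem_flatMap, PySem.List.mem_pyRange_one, mem_pvBlock,
    PySem.Int.floordiv_eq_ediv_of_pos (b := 12) (by norm_num)]
  constructor
  · rintro ⟨k, ⟨hk0, hk1⟩, d, hd, h1, h2, rfl⟩
    omega
  · rintro ⟨h1, h2, hm⟩
    refine ⟨(n - root) / 12, by omega, (n - root) % 12, by omega, by omega, by omega, by omega⟩

-- strict sortedness of both sides
theorem pairwise_get_major_scale (root low high : Int) :
    (get_major_scale root low high).Pairwise (· < ·) := by
  rw [get_major_scale_eq_filter]
  exact (PySem.List.pairwise_lt_pyRange_one _ _).filter _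

theorem pairwise_pvBlock (root low high k : Int) :
    (pvBlock root low high k).Pairwise (· < ·) := by
  unfold pvBlock
  rw [List.pairwise_map]
  refine List.Pairwise.filter _ (List.Pairwise.imp ?_
    (by decide : ([0, 2, 4, 5, 7, 9, 11] : List Int).Pairwise (· < ·)))
  intro a b h
  omega

theorem mem_pvBlock_bounds (root low high k n : Int) (h : n ∈ pvBlock root low high k) :
    root + 12 * k ≤ n ∧ n ≤ root + 12 * k + 11 := by
  rw [mem_pvBlock] at h
  obtain ⟨d, hd, _, _, rfl⟩ := h
  omega

theorem pairwise_get_major_scale_alt (root low high : Int) :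
    (get_major_scale_alt root low high).Pairwise (· < ·) := by
  rw [get_major_scale_alt_eq_flatMap]
  rw [List.flatMap_def, List.pairwise_flatten]
  refine ⟨?_, ?_⟩
  · intro l hl
    simp only [List.mem_map] at hl
    obtain ⟨k, _, rfl⟩ := hl
    exact pairwise_pvBlock root low high k
  · rw [List.pairwise_map]
    refine List.Pairwise.imp_of_mem ?_ (PySem.List.pairwise_lt_pyRange_one _ _)
    intro k k' _ _ hkk' x hx y hy
    have hxb := mem_pvBlock_bounds root low high k x hx
    have hyb := mem_pvBlock_bounds root low high k' y hy
    omega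

-- ===== VERDICT (by name: the statement is the Claim_ definition above) =====
theorem get_major_scale_spec : Claim_equal_get_major_scale := by
  intro root low high _
  unfold Spec_get_major_scale
  refine List.Pairwise.eq_of_mem_iff (pairwise_get_major_scale root low high)
    (pairwise_get_major_scale_alt root low high) ?_
  intro n
  rw [mem_get_major_scale, mem_get_major_scale_alt]
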